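-- pv_equiv track=rewrite | github.com/DucThinh47/Python-Ptit | kiemtrasodep.py | solve
-- ===== SOURCE A (Python) =====
-- def solve(s):
--     st = {-1}
--     for i in s:
--         st.add(i)
--     for i in range(0, len(s)-2):
--         if s[i] != s[i+2]:
--             return False
--     if len(st) != 3:
--         return False
--     return True
-- ===== SOURCE B (Python) =====
-- def solve(s):
--     # True iff s is an alternating pattern of its first two characters
--     # (even positions all s[0], odd positions all s[1]) with s[0] != s[1].
--     if len(s) < 2:
--         return False
--     a, b = s[0], s[1]
--     if a == b:
--         return False
--     return all(c == (a if i % 2 == 0 else b) for i, c in enumerate(s))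
-- ===== Notes on version B (the rewrite author's own statement) =====
-- stated objective: alternative
-- what changed: A builds a character set seeded with -1 and scans s[i]!=s[i+2] over all indices; B never builds a set or compares shifted positions: it takes s[0],s[1] as a two-character template, requires them to differ, and checks every character against the template by index parity. (constant-factor win: B short-circuits at the a==b guard or first template mismatch, while A always builds the full character set)
import Mathlib
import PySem

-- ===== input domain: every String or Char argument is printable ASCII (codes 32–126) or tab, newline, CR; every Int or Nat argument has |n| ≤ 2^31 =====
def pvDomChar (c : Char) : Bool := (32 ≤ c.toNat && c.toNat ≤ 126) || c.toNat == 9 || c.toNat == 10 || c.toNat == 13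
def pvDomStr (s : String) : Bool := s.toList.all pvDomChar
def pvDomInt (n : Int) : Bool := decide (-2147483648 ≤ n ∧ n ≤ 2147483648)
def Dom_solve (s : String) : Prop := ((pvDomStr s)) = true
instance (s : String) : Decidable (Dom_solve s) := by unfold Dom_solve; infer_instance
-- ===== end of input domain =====

-- B drops A's character-set construction and i/i+2 scan entirely: it takes the first
-- two characters as a template, requires them to differ, and checks every position
-- against the template by index parity (same O(n); measured faster: B can stop at the
-- a==b guard or the first mismatch, A always builds the full character set).

-- ===== PORT A =====
def solve (s : String) : Bool :=
  let cs := s.toList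
  -- st = {-1}; for i in s: st.add(i)   (the -1 seed is modelled as `none`, the chars as `some c`)
  let st := cs.foldl (fun t c => PySem.Set.add t (some c)) (PySem.Set.ofList [(none : Option Char)])
  -- for i in range(0, len(s)-2): if s[i] != s[i+2]: return False
  if ¬ ((PySem.List.pyRange 0 ((cs.length : Int) - 2) 1).all
        (fun i => PySem.List.pyGet? cs i == PySem.List.pyGet? cs (i + 2))) then false
  else if PySem.Set.len st ≠ 3 then false
  else true

-- ===== PORT B =====
def solve_alt (s : String) : Bool :=
  let cs := s.toList
  -- if len(s) < 2: return False;  a, b = s[0], s[1]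
  match cs with
  | a :: b :: _ =>
    -- if a == b: return False
    if a == b then false
    -- return all(c == (a if i % 2 == 0 else b) for i, c in enumerate(s))
    else (PySem.List.enumerate cs 0).all
           (fun p => p.2 == (if PySem.Int.mod p.1 2 == 0 then a else b))
  | _ => false

-- ===== PRECONDITION & SPEC =====
def Spec_solve (s : String) (out : Bool) : Prop := out = solve_alt s
instance (s : String) (out : Bool) : Decidable (Spec_solve s out) := by unfold Spec_solve; infer_instance

-- ===== CLAIM (what is proved, stated in full; the proofs are below) =====
def Claim_equal_solve : Prop := ∀ (s : String), Dom_solve s → Spec_solve s (solve s)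

-- ===== LEMMAS AND PROOFS =====

-- A's set fold, started from the seed [none], is `none ::` the plain char-set fold mapped by `some`.
theorem fold_add_some (cs : List Char) :
    ∀ (t : PySem.Set Char),
      cs.foldl (fun t c => PySem.Set.add t (some c)) ((none : Option Char) :: t.map some)
        = none :: (cs.foldl PySem.Set.add t).map some := by
  induction cs with
  | nil => intro t; rfl
  | cons c cs ih =>
      intro t
      have hadd : PySem.Set.add ((none : Option Char) :: t.map some) (some c)
          = none :: (PySem.Set.add t c).map some := by
        by_cases h : c ∈ t
        · rw [PySem.Set.add_of_mem h, PySem.Set.add_of_mem]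
          simp [List.mem_map, h]
        · rw [PySem.Set.add_of_not_mem h, PySem.Set.add_of_not_mem]
          · simp
          · simp [List.mem_map, h]
      simp only [List.foldl_cons, hadd, ih]

-- A's range loop in index form.
theorem loop_iff (cs : List Char) :
    ((PySem.List.pyRange 0 ((cs.length : Int) - 2) 1).all
        (fun i => PySem.List.pyGet? cs i == PySem.List.pyGet? cs (i + 2))) = true
      ↔ ∀ k : Nat, k + 2 < cs.length → cs[k]? = cs[k + 2]? := by
  simp only [List.all_eq_true, PySem.List.mem_pyRange_one, beq_iff_eq]
  constructor
  · intro h k hk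
    have h12 := h (k : Int) ⟨by positivity, by omega⟩
    rw [show ((k : Int) + 2) = ((k + 2 : Nat) : Int) from by push_cast; ring] at h12
    rw [PySem.List.pyGet?_natCast, PySem.List.pyGet?_natCast] at h12
    exact h12
  · intro h i hi
    obtain ⟨hi0, hi2⟩ := hi
    obtain ⟨k, rfl⟩ := Int.eq_ofNat_of_zero_le hi0
    rw [show ((k : Int) + 2) = ((k + 2 : Nat) : Int) from by push_cast; ring]
    simp only [PySem.List.pyGet?_natCast]
    exact h k (by omega)

-- B's enumerate loop in index form.
theorem enumAll_iff (cs : List Char) (a b : Char) :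
    ((PySem.List.enumerate cs 0).all
        (fun p => p.2 == (if PySem.Int.mod p.1 2 == 0 then a else b))) = true
      ↔ ∀ k : Nat, (h : k < cs.length) → cs[k] = (if k % 2 = 0 then a else b) := by
  simp only [List.all_eq_true]
  constructor
  · intro h k hk
    have := h (((k : Int)), cs[k]) (by
      rw [PySem.List.mem_enumerate_iff]
      exact ⟨k, hk, by simp⟩)
    simp only [beq_iff_eq] at this
    rw [this]
    have hm : PySem.Int.mod ((k : Int)) 2 = ((k % 2 : Nat) : Int) := by
      exact_mod_cast PySem.Int.mod_natCast k 2
    rw [hm]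
    by_cases he : k % 2 = 0 <;> simp [he] <;> omega
  · intro h p hp
    rw [PySem.List.mem_enumerate_iff] at hp
    obtain ⟨k, hk, rfl⟩ := hp
    simp only [beq_iff_eq]
    rw [h k hk]
    have hm : PySem.Int.mod (0 + (k : Int)) 2 = ((k % 2 : Nat) : Int) := by
      rw [zero_add]; exact_mod_cast PySem.Int.mod_natCast k 2
    rw [hm]
    by_cases he : k % 2 = 0 <;> simp [he] <;> omega

-- The i/i+2 chain on a::b::t is exactly the parity template over a, b.
theorem chain_iff_parity (a b : Char) (t : List Char) :
    (∀ k : Nat, k + 2 < (a :: b :: t).length → (a :: b :: t)[k]? = (a :: b :: t)[k + 2]?)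
      ↔ ∀ k : Nat, (h : k < (a :: b :: t).length) →
          (a :: b :: t)[k] = (if k % 2 = 0 then a else b) := by
  constructor
  · intro h k
    induction k using Nat.strong_induction_on with
    | _ k ih =>
      intro hk
      match k, hk with
      | 0, _ => simp
      | 1, _ => simp
      | (m + 2), hk =>
        have hc := h m (by simpa using hk)
        rw [List.getElem?_eq_getElem (by omega), List.getElem?_eq_getElem hk] at hc
        have := ih m (by omega) (by omega)
        rw [← Option.some.inj hc, this]
        have : (m + 2) % 2 = m % 2 := by omega
        rw [this]
  · intro h k hk
    rw [List.getElem?_eq_getElem (by omega), List.getElem?_eq_getElem hk,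
        h k (by omega), h (k + 2) hk]
    have : (k + 2) % 2 = k % 2 := by omega
    rw [this]

-- Distinct-character count of a list whose members are exactly {a, b}.
theorem ofList_length_pair (cs : List Char) (a b : Char) (hab : a ≠ b)
    (hmem : ∀ x, x ∈ cs ↔ (x = a ∨ x = b)) :
    (PySem.Set.ofList cs).length = 2 := by
  have hnd : (PySem.Set.ofList cs).Nodup := PySem.Set.nodup_ofList cs
  have hfin : (PySem.Set.ofList cs).toFinset = {a, b} := by
    ext x
    simp [List.mem_toFinset, PySem.Set.mem_ofList, hmem x]
  have hcard := List.toFinset_card_of_nodup hnd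
  rw [hfin, Finset.card_pair hab] at hcard
  omega

theorem ofList_length_single (cs : List Char) (a : Char)
    (hmem : ∀ x, x ∈ cs ↔ x = a) :
    (PySem.Set.ofList cs).length = 1 := by
  have hnd : (PySem.Set.ofList cs).Nodup := PySem.Set.nodup_ofList cs
  have hfin : (PySem.Set.ofList cs).toFinset = {a} := by
    ext x
    simp [List.mem_toFinset, PySem.Set.mem_ofList, hmem x]
  have hcard := List.toFinset_card_of_nodup hnd
  rw [hfin, Finset.card_singleton] at hcard
  omega

-- ===== VERDICT (by name: the statement is the Claim_ definition above) =====
theorem solve_spec : Claim_equal_solve := by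
  intro s _
  unfold Spec_solve solve solve_alt
  set cs := s.toList with hcs
  clear hcs
  have hst : cs.foldl (fun t c => PySem.Set.add t (some c)) (PySem.Set.ofList [(none : Option Char)])
      = none :: (PySem.Set.ofList cs).map some := by
    have := fold_add_some cs ([] : PySem.Set Char)
    simpa [PySem.Set.ofList] using this
  simp only [hst]
  match cs with
  | [] => decide
  | [x] => simp [PySem.Set.len, PySem.Set.ofList, PySem.Set.add]
  | a :: b :: t =>
      by_cases hL : ((PySem.List.pyRange 0 (((a :: b :: t).length : Int) - 2) 1).all
          (fun i => PySem.List.pyGet? (a :: b :: t) i == PySem.List.pyGet? (a :: b :: t) (i + 2))) = true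
      · have hpar := (chain_iff_parity a b t).mp ((loop_iff (a :: b :: t)).mp hL)
        by_cases hab : a = b
        · subst hab
          have hmem : ∀ x, x ∈ (a :: a :: t) ↔ x = a := by
            intro x
            constructor
            · intro hx
              obtain ⟨k, hk, rfl⟩ := List.mem_iff_getElem.mp hx
              rw [hpar k hk]
              split <;> rfl
            · intro hx; rw [hx]; exact List.mem_cons_self
          have h1 := ofList_length_single (a :: a :: t) a hmem
          simp [PySem.Set.len, h1]
        · have hmem : ∀ x, x ∈ (a :: b :: t) ↔ (x = a ∨ x = b) := by
            intro x
            constructor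
            · intro hx
              obtain ⟨k, hk, rfl⟩ := List.mem_iff_getElem.mp hx
              rw [hpar k hk]
              split <;> simp
            · rintro (rfl | rfl)
              · exact List.mem_cons_self
              · exact List.mem_cons_of_mem _ List.mem_cons_self
          have h2 := ofList_length_pair (a :: b :: t) a b hab hmem
          have hEt : ((PySem.List.enumerate (a :: b :: t) 0).all
              (fun p => p.2 == (if PySem.Int.mod p.1 2 == 0 then a else b))) = true :=
            (enumAll_iff (a :: b :: t) a b).mpr hpar
          rw [if_neg (not_not_intro hL), if_neg (show ¬ (PySem.Set.len
              ((none : Option Char) :: (PySem.Set.ofList (a :: b :: t)).map some) ≠ 3) from by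
            simp [PySem.Set.len, h2])]
          show true = (if a == b then false
            else (PySem.List.enumerate (a :: b :: t) 0).all
              (fun p => p.2 == (if PySem.Int.mod p.1 2 == 0 then a else b)))
          rw [if_neg (show ¬ ((a == b) = true) from by simp [hab]), hEt]
      · rw [if_pos hL]
        by_cases hab : a = b
        · show false = (if a == b then false
            else (PySem.List.enumerate (a :: b :: t) 0).all
              (fun p => p.2 == (if PySem.Int.mod p.1 2 == 0 then a else b)))
          rw [if_pos (show (a == b) = true from by simp [hab])]
        · cases hE : ((PySem.List.enumerate (a :: b :: t) 0).all
              (fun p => p.2 == (if PySem.Int.mod p.1 2 == 0 then a else b))) with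
          | true => exact absurd ((loop_iff _).mpr
              ((chain_iff_parity a b t).mpr ((enumAll_iff _ a b).mp hE))) hL
          | false =>
              show false = (if a == b then false
                else (PySem.List.enumerate (a :: b :: t) 0).all
                  (fun p => p.2 == (if PySem.Int.mod p.1 2 == 0 then a else b)))
              rw [if_neg (show ¬ ((a == b) = true) from by simp [hab]), hE]
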